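-- pv_equiv track=rewrite | github.com/SatelliteShorelines/CoastSeg | scripts/georeference_jpgs.py | group_jpegs_by_satellite
-- ===== SOURCE A (Python) =====
-- def get_satellite_name(filename: str):
--     """Returns the satellite name in the jpg name. Does not work tiffs"""
--     try:
--         return filename.split("_")[2].split(".")[0]
--     except IndexError:
--         # logger.error(f"Unable to extract satellite name from filename: {filename}")
--         return None
--
-- def group_jpegs_by_satellite(jpeg_filenames: list[str]):
--     """
--     Group JPEG filenames by satellite name.
--
--     Parameters:
--     - jpeg_filenames (list of str): List of JPEG filenames to be grouped.
--
--     Returns: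
--     - dict: A dictionary where the keys are satellite names (e.g., 'L5', 'L7', etc.)
--             and the values are lists of filenames associated with each satellite.
--     """
--     sat_dict = {
--         "L5": [],
--         "L7": [],
--         "L8": [],
--         "L9": [],
--         "S2": [],
--     }
--     for filename in jpeg_filenames:
--         satname = get_satellite_name(filename)
--         if satname in sat_dict:
--             sat_dict[satname].append(filename)
--     return sat_dict
-- ===== SOURCE B (Python) =====
-- def get_satellite_name(filename: str):
--     """Returns the satellite name in the jpg name. Does not work tiffs"""
--     try:
--         return filename.split("_")[2].split(".")[0]
--     except IndexError:
--         return None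
--
--
-- SATELLITES = ["L5", "L7", "L8", "L9", "S2"]
--
--
-- def group_jpegs_by_satellite(jpeg_filenames: list[str]):
--     """Group JPEG filenames by satellite name: one filter pass per satellite."""
--     return {
--         sat: [f for f in jpeg_filenames if get_satellite_name(f) == sat]
--         for sat in SATELLITES
--     }
-- ===== Notes on version B (the rewrite author's own statement) =====
-- stated objective: simpler
-- what changed: Replaced the single bucketing pass with per-item dict lookup/append by a dict comprehension over the five fixed satellite names, each value a list comprehension filtering the filenames for that satellite (five independent scans instead of one dispatch pass).
import Mathlib
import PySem

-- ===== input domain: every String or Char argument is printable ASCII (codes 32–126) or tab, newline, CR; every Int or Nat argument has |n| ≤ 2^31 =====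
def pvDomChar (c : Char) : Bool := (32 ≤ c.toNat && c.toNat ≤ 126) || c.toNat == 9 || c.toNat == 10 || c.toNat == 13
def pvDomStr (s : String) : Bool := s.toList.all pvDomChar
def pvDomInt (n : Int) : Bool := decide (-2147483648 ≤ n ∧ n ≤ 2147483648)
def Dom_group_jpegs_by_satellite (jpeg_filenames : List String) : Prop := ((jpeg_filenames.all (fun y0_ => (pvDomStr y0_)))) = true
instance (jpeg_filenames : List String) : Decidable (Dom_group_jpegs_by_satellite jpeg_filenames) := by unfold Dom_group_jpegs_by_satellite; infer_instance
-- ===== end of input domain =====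

-- B replaces A's single bucketing pass (dict lookup + append per item) by one filter pass
-- per fixed satellite name; simpler, same results.


-- ===== PORT A =====
def get_satellite_name (filename : String) : Option String :=
  match PySem.Str.split? filename "_" with      -- split? is some: sep "_" ≠ ""
  | none => none
  | some parts =>
    match PySem.List.pyGet? parts 2 with
    | none => none        -- IndexError caught -> None
    | some s =>
      match PySem.Str.split? s "." with
      | none => none
      | some parts2 => PySem.List.pyGet? parts2 0

def group_jpegs_by_satellite (jpeg_filenames : List String) : List (String × List String) :=
  let sat_dict : PySem.Dict String (List String) :=
    PySem.Dict.ofList [("L5", []), ("L7", []), ("L8", []), ("L9", []), ("S2", [])]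
  (jpeg_filenames.foldl (fun d filename =>
    match get_satellite_name filename with
    | some satname =>
        if d.contains satname then d.modify satname [] (fun l => l ++ [filename]) else d
    | none => d) sat_dict).items

-- ===== PORT B =====
def get_satellite_name_alt (filename : String) : Option String :=
  match PySem.Str.split? filename "_" with
  | none => none
  | some parts =>
    match PySem.List.pyGet? parts 2 with
    | none => none
    | some s =>
      match PySem.Str.split? s "." with
      | none => none
      | some parts2 => PySem.List.pyGet? parts2 0

def pvSatellites : List String := ["L5", "L7", "L8", "L9", "S2"]

def group_jpegs_by_satellite_alt (jpeg_filenames : List String) : List (String × List String) :=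
  pvSatellites.map (fun sat =>
    (sat, jpeg_filenames.filter (fun f => get_satellite_name_alt f == some sat)))

-- ===== PRECONDITION & SPEC =====
def Spec_group_jpegs_by_satellite (jpeg_filenames : List String) (out : List (String × List String)) : Prop := out = group_jpegs_by_satellite_alt jpeg_filenames
instance (jpeg_filenames : List String) (out : List (String × List String)) : Decidable (Spec_group_jpegs_by_satellite jpeg_filenames out) := by unfold Spec_group_jpegs_by_satellite; infer_instance

-- ===== CLAIM (what is proved, stated in full; the proofs are below) =====
def Claim_equal_group_jpegs_by_satellite : Prop := ∀ (jpeg_filenames : List String), Dom_group_jpegs_by_satellite jpeg_filenames → Spec_group_jpegs_by_satellite jpeg_filenames (group_jpegs_by_satellite jpeg_filenames)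

-- ===== LEMMAS AND PROOFS =====

-- Invariant of A's fold: keys stay the five satellites, and each key's bucket grows by
-- exactly the filenames whose satellite name equals that key.
theorem pv_fold_invariant (fs : List String) :
    ∀ (d : PySem.Dict String (List String)), d.keys = pvSatellites →
      (fs.foldl (fun d filename =>
        match get_satellite_name filename with
        | some satname =>
            if d.contains satname then d.modify satname [] (fun l => l ++ [filename]) else d
        | none => d) d).keys = pvSatellites ∧
      ∀ k ∈ pvSatellites,
        (fs.foldl (fun d filename =>
          match get_satellite_name filename with
          | some satname =>
              if d.contains satname then d.modify satname [] (fun l => l ++ [filename]) else d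
          | none => d) d).getD k []
        = d.getD k [] ++ fs.filter (fun f => get_satellite_name_alt f == some k) := by
  induction fs with
  | nil => intro d hk; exact ⟨hk, fun k _ => by simp⟩
  | cons f fs ih =>
    intro d hk
    have halt : get_satellite_name_alt f = get_satellite_name f := rfl
    cases hsat : get_satellite_name f with
    | none =>
        have := ih d hk
        refine ⟨by simpa [hsat] using this.1, fun k hkmem => ?_⟩
        simp only [List.foldl_cons, hsat]
        rw [(this.2 k hkmem)]
        simp [halt, hsat]
    | some s =>
        by_cases hs : s ∈ pvSatellites
        · have hcont : d.contains s = true := by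
            rw [PySem.Dict.contains_eq_decide_mem_keys, hk]; simpa using hs
          have hk' : (d.modify s [] (fun l => l ++ [f])).keys = pvSatellites := by
            rw [PySem.Dict.keys_modify, PySem.Dict.keys_insert_of_contains _ _ hcont]; exact hk
          have := ih (d.modify s [] (fun l => l ++ [f])) hk'
          refine ⟨by simpa [hsat, hcont] using this.1, fun k hkmem => ?_⟩
          simp only [List.foldl_cons, hsat, hcont, if_true]
          rw [this.2 k hkmem]
          by_cases hks : k = s
          · subst hks
            rw [PySem.Dict.getD_modify_self]
            simp [halt, hsat]
          · rw [PySem.Dict.getD_modify_of_ne _ _ _ hks]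
            simp only [List.filter_cons, halt, hsat]
            have : (some s == some k) = false := by
              simp only [beq_eq_false_iff_ne, ne_eq, Option.some.injEq]
              exact fun h => hks h.symm
            simp [this]
        · have hcont : d.contains s = false := by
            rw [PySem.Dict.contains_eq_decide_mem_keys, hk]; simpa using hs
          have := ih d hk
          refine ⟨by simpa [hsat, hcont] using this.1, fun k hkmem => ?_⟩
          simp only [List.foldl_cons, hsat, hcont, Bool.false_eq_true, if_false]
          rw [this.2 k hkmem]
          simp only [List.filter_cons, halt, hsat]
          have : (some s == some k) = false := by
            simp only [beq_eq_false_iff_ne, ne_eq, Option.some.injEq]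
            exact fun h => hs (h ▸ hkmem)
          simp [this]

-- ===== VERDICT (by name: the statement is the Claim_ definition above) =====
theorem group_jpegs_by_satellite_spec : Claim_equal_group_jpegs_by_satellite := by
  intro fs _
  unfold Spec_group_jpegs_by_satellite group_jpegs_by_satellite group_jpegs_by_satellite_alt
  have h := pv_fold_invariant fs
    (PySem.Dict.ofList [("L5", []), ("L7", []), ("L8", []), ("L9", []), ("S2", [])])
    (by decide)
  rw [PySem.Dict.items_eq_map_keys _ (by rw [h.1]; decide) []]
  rw [h.1]
  apply List.map_congr_left
  intro k hkmem
  rw [h.2 k hkmem]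
  have hinit : (PySem.Dict.ofList
      [("L5", []), ("L7", []), ("L8", []), ("L9", []), ("S2", [])]).getD k ([] : List String) = [] := by
    fin_cases hkmem <;> decide
  rw [hinit]; simp
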